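-- pv_equiv track=rewrite | github.com/sulanaD/ContentForge | agents/writer_agent.py | _generate_contextual_paragraph
-- ===== SOURCE A (Python) =====
-- def _generate_contextual_paragraph(topic: str, target_words: int) -> str:
--     """Generate additional contextual content to meet word requirements."""
--     paragraphs = [
--         f"The landscape surrounding {topic} continues to evolve at a rapid pace. Staying informed about these developments is essential for anyone seeking to maintain a competitive edge and make well-informed decisions.",
--         f"Research in this area has revealed numerous insights that challenge conventional thinking and open new avenues for exploration. The interdisciplinary nature of {topic} means that developments in related fields often have significant implications.",
--         f"Industry leaders and thought leaders have emphasized the transformative potential of {topic}. Their perspectives provide valuable guidance for navigating the complexities and capitalizing on emerging opportunities.",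
--         f"As we look to the future, the trajectory of {topic} appears increasingly significant. Understanding current trends and anticipating future developments will be crucial for success in this dynamic environment.",
--         f"The practical applications of knowledge in this area extend across diverse sectors and contexts. From individual practitioners to large organizations, the relevance of {topic} touches virtually every aspect of modern life.",
--     ]
--
--     result = []
--     current_words = 0
--     idx = 0
--
--     while current_words < target_words and idx < len(paragraphs) * 2:
--         para = paragraphs[idx % len(paragraphs)]
--         result.append(para)
--         current_words += len(para.split())
--         idx += 1
--
--     return '\n\n'.join(result)
-- ===== SOURCE B (Python) =====
-- def _generate_contextual_paragraph(topic: str, target_words: int) -> str: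
--     """Generate additional contextual content to meet word requirements."""
--     templates = [
--         f"The landscape surrounding {topic} continues to evolve at a rapid pace. Staying informed about these developments is essential for anyone seeking to maintain a competitive edge and make well-informed decisions.",
--         f"Research in this area has revealed numerous insights that challenge conventional thinking and open new avenues for exploration. The interdisciplinary nature of {topic} means that developments in related fields often have significant implications.",
--         f"Industry leaders and thought leaders have emphasized the transformative potential of {topic}. Their perspectives provide valuable guidance for navigating the complexities and capitalizing on emerging opportunities.",
--         f"As we look to the future, the trajectory of {topic} appears increasingly significant. Understanding current trends and anticipating future developments will be crucial for success in this dynamic environment.",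
--         f"The practical applications of knowledge in this area extend across diverse sectors and contexts. From individual practitioners to large organizations, the relevance of {topic} touches virtually every aspect of modern life.",
--     ]
--     paras = templates * 2
--     prefix = []
--     total = 0
--     for p in paras:
--         total += len(p.split())
--         prefix.append(total)
--     if target_words > 0:
--         k = len(paras)
--         for i, s in enumerate(prefix):
--             if s >= target_words:
--                 k = i + 1
--                 break
--     else:
--         k = 0
--     return '\n\n'.join(paras[:k])
-- ===== Notes on version B (the rewrite author's own statement) =====
-- stated objective: alternative
-- what changed: Replaces A's as-you-go while-loop accumulation with a precomputed prefix-sum table over the ten cycled paragraphs, a single cutoff scan for the smallest prefix reaching the target, and a slice-and-join.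
import Mathlib
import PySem

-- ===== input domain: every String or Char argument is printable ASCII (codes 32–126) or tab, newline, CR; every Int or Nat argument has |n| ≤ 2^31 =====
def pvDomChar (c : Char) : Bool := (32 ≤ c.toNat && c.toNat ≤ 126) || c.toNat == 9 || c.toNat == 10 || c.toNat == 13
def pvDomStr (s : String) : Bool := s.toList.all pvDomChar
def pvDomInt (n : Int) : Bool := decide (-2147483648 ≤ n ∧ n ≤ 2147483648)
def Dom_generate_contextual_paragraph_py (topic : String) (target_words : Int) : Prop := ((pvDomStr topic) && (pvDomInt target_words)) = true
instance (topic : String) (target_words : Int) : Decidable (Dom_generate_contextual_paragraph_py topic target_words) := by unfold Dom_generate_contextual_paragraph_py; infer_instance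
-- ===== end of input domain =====

-- B replaces A's as-you-go accumulation loop by a prefix-sum table plus a single cutoff scan (objective: alternative decomposition, same cost).

-- the paragraph templates instantiated with the topic (identical literal list in both Pythons)
def pvParagraphs (topic : String) : List String := [
  "The landscape surrounding " ++ topic ++ " continues to evolve at a rapid pace. Staying informed about these developments is essential for anyone seeking to maintain a competitive edge and make well-informed decisions.",
  "Research in this area has revealed numerous insights that challenge conventional thinking and open new avenues for exploration. The interdisciplinary nature of " ++ topic ++ " means that developments in related fields often have significant implications.",
  "Industry leaders and thought leaders have emphasized the transformative potential of " ++ topic ++ ". Their perspectives provide valuable guidance for navigating the complexities and capitalizing on emerging opportunities.",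
  "As we look to the future, the trajectory of " ++ topic ++ " appears increasingly significant. Understanding current trends and anticipating future developments will be crucial for success in this dynamic environment.",
  "The practical applications of knowledge in this area extend across diverse sectors and contexts. From individual practitioners to large organizations, the relevance of " ++ topic ++ " touches virtually every aspect of modern life."]

-- len(p.split()) (used by both Pythons)
def pvWc (p : String) : Int := ((PySem.Str.split₀ p).length : Int)

-- ===== PORT A =====
-- A's while loop: append paragraphs[idx % 5] while current_words < target and idx < 10
def pvALoop (paras : List String) (target current : Int) (idx : Nat) : List String :=
  if h : current < target ∧ idx < paras.length * 2 then
    let para := (PySem.List.pyGet? paras ((idx : Int) % (paras.length : Int))).getD ""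
    para :: pvALoop paras target (current + pvWc para) (idx + 1)
  else []
termination_by paras.length * 2 - idx
decreasing_by omega

def generate_contextual_paragraph_py (topic : String) (target_words : Int) : String :=
  PySem.Str.join "\n\n" (pvALoop (pvParagraphs topic) target_words 0 0)

-- ===== PORT B =====
-- running prefix totals of word counts (B's first for-loop)
def pvPrefix : List String → Int → List Int
  | [], _ => []
  | p :: ps, total => (total + pvWc p) :: pvPrefix ps (total + pvWc p)

-- first index i with prefix[i] >= target, reported as i+1 (B's cutoff scan)
def pvFirstGe : List Int → Int → Nat → Option Nat
  | [], _, _ => none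
  | s :: rest, t, i => if s ≥ t then some (i + 1) else pvFirstGe rest t (i + 1)

def generate_contextual_paragraph_py_alt (topic : String) (target_words : Int) : String :=
  let templates := pvParagraphs topic
  let paras := templates ++ templates
  let pfx := pvPrefix paras 0
  let k := if target_words > 0 then (pvFirstGe pfx target_words 0).getD paras.length else 0
  PySem.Str.join "\n\n" (paras.take k)

-- ===== PRECONDITION & SPEC =====
def Spec_generate_contextual_paragraph_py (topic : String) (target_words : Int) (out : String) : Prop := out = generate_contextual_paragraph_py_alt topic target_words
instance (topic : String) (target_words : Int) (out : String) : Decidable (Spec_generate_contextual_paragraph_py topic target_words out) := by unfold Spec_generate_contextual_paragraph_py; infer_instance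

-- ===== CLAIM (what is proved, stated in full; the proofs are below) =====
def Claim_equal_generate_contextual_paragraph_py : Prop := ∀ (topic : String) (target_words : Int), Dom_generate_contextual_paragraph_py topic target_words → Spec_generate_contextual_paragraph_py topic target_words (generate_contextual_paragraph_py topic target_words)

-- ===== LEMMAS AND PROOFS =====

-- A's loop, rephrased over the remaining (already doubled) paragraph list
def pvAGen : List String → Int → Int → List String
  | [], _, _ => []
  | p :: rest, cur, t => if cur < t then p :: pvAGen rest (cur + pvWc p) t else []

lemma pvFirstGe_shift (ps : List Int) (t : Int) : ∀ i, pvFirstGe ps t (i + 1) = (pvFirstGe ps t i).map (· + 1) := by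
  induction ps with
  | nil => intro i; simp [pvFirstGe]
  | cons s rest ih =>
      intro i
      by_cases h : s ≥ t <;> simp [pvFirstGe, h, ih (i + 1)]

lemma pvAGen_eq_take (L : List String) : ∀ (cur t : Int),
    pvAGen L cur t = L.take (if cur < t then (pvFirstGe (pvPrefix L cur) t 0).getD L.length else 0) := by
  induction L with
  | nil => intro cur t; simp [pvAGen]
  | cons p rest ih =>
      intro cur t
      by_cases h : cur < t
      · simp only [pvAGen, pvPrefix, pvFirstGe, if_pos h]
        by_cases h2 : cur + pvWc p ≥ t
        · have h3 : ¬ (cur + pvWc p < t) := by omega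
          simp [ih, h2, h3]
        · have h3 : cur + pvWc p < t := by omega
          simp [ih, h2, h3, pvFirstGe_shift]
      · simp [pvAGen, h]

lemma pvALoop_eq_gen (paras : List String) (t : Int) :
    ∀ (n idx : Nat), paras.length * 2 - idx ≤ n → idx ≤ paras.length * 2 →
    ∀ (cur : Int), pvALoop paras t cur idx = pvAGen ((paras ++ paras).drop idx) cur t := by
  intro n
  induction n with
  | zero =>
      intro idx hn hle cur
      have hidx : idx = paras.length * 2 := by omega
      rw [pvALoop]
      have : ¬ (cur < t ∧ idx < paras.length * 2) := by omega
      rw [dif_neg this]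
      have : (paras ++ paras).drop idx = [] := by
        apply List.drop_eq_nil_of_le; simp; omega
      rw [this]; rfl
  | succ m ih =>
      intro idx hn hle cur
      rw [pvALoop]
      by_cases hc : cur < t ∧ idx < paras.length * 2
      · rw [dif_pos hc]
        have hidx2 : idx < (paras ++ paras).length := by simp; omega
        have hdrop : (paras ++ paras).drop idx = (paras ++ paras)[idx] :: (paras ++ paras).drop (idx + 1) :=
          List.drop_eq_getElem_cons hidx2
        have hget : (PySem.List.pyGet? paras ((idx : Int) % (paras.length : Int))).getD "" = (paras ++ paras)[idx] := by
          have hmod : ((idx : Int) % (paras.length : Int)) = ((idx % paras.length : Nat) : Int) := by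
            push_cast; rfl
          rw [hmod, PySem.List.pyGet?_natCast]
          by_cases hlt : idx < paras.length
          · rw [Nat.mod_eq_of_lt hlt]
            rw [List.getElem_append_left (by omega)]
            simp [List.getElem?_eq_getElem (by omega : idx < paras.length)]
          · have h5 : idx % paras.length = idx - paras.length := by
              rw [Nat.mod_eq_sub_mod (by omega)]
              exact Nat.mod_eq_of_lt (by omega)
            rw [h5, List.getElem_append_right (by omega)]
            simp [List.getElem?_eq_getElem (by omega : idx - paras.length < paras.length)]
        simp only [hget]
        rw [hdrop]
        simp only [pvAGen, if_pos hc.1]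
        exact congrArg _ (ih (idx + 1) (by omega) (by omega) _)
      · rw [dif_neg hc]
        rcases (not_and_or.mp hc) with h1 | h2
        · have hcur : ¬ cur < t := h1
          cases hd : (paras ++ paras).drop idx with
          | nil => rfl
          | cons q qs => simp [pvAGen, hcur]
        · have hidx : idx = paras.length * 2 := by omega
          have : (paras ++ paras).drop idx = [] := by
            apply List.drop_eq_nil_of_le; simp; omega
          rw [this]; rfl

-- ===== VERDICT (by name: the statement is the Claim_ definition above) =====
theorem generate_contextual_paragraph_py_spec : Claim_equal_generate_contextual_paragraph_py := by
  intro topic target_words _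
  show generate_contextual_paragraph_py topic target_words = generate_contextual_paragraph_py_alt topic target_words
  unfold generate_contextual_paragraph_py generate_contextual_paragraph_py_alt
  have h1 := pvALoop_eq_gen (pvParagraphs topic) target_words ((pvParagraphs topic).length * 2) 0 (by omega) (by omega) 0
  rw [h1]
  simp only [List.drop_zero]
  rw [pvAGen_eq_take]
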